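-- pv_equiv track=rewrite | github.com/talas9/tesla | scripts/parse_gateway_sd_log.py | gather_timeline
-- ===== SOURCE A (Python) =====
-- from typing import Dict, List, Optional, Tuple
--
-- TIMELINE_KEY_PHRASES = [
--     "Spawn Update Task",
--     "Two-pass update",
--     "Begin hwidacq",
--     "Queuing",
--     "Entered OTA state",
--     "tftp src",
--     "Update",
--     "Update completed",
--     "Rebooting",
-- ]
--
-- def gather_timeline(entries: List[Tuple[str, str, str]]) -> List[Tuple[str, str]]:
--     seen = set()
--     timeline = []
--     for ts, tag, msg in entries:
--         combined = f"{tag} {msg}".strip()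
--         for phrase in TIMELINE_KEY_PHRASES:
--             if phrase in combined and phrase not in seen:
--                 seen.add(phrase)
--                 timeline.append((ts or "(no-ts)", combined))
--     return timeline
-- ===== SOURCE B (Python) =====
-- TIMELINE_KEY_PHRASES = [
--     "Spawn Update Task",
--     "Two-pass update",
--     "Begin hwidacq",
--     "Queuing",
--     "Entered OTA state",
--     "tftp src",
--     "Update",
--     "Update completed",
--     "Rebooting",
-- ]
--
-- def gather_timeline(entries):
--     # Build the (ts, combined) view once, then find each phrase's first
--     # occurrence and emit the records sorted by (entry index, phrase index).
--     combos = [(ts or "(no-ts)", (tag + " " + msg).strip()) for ts, tag, msg in entries]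
--     records = []
--     for p, phrase in enumerate(TIMELINE_KEY_PHRASES):
--         for e, (out_ts, combined) in enumerate(combos):
--             if phrase in combined:
--                 records.append((e * len(TIMELINE_KEY_PHRASES) + p, out_ts, combined))
--                 break
--     records.sort(key=lambda r: r[0])
--     return [(ts, combined) for _, ts, combined in records]
-- ===== Notes on version B (the rewrite author's own statement) =====
-- stated objective: alternative
-- what changed: Instead of A's single scan over entries with a running seen-set, B computes each phrase's first-occurrence record by scanning the precomputed (ts, combined) list per phrase, then sorts the records by entry-index*len(phrases)+phrase-index and projects.
import Mathlib
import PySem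

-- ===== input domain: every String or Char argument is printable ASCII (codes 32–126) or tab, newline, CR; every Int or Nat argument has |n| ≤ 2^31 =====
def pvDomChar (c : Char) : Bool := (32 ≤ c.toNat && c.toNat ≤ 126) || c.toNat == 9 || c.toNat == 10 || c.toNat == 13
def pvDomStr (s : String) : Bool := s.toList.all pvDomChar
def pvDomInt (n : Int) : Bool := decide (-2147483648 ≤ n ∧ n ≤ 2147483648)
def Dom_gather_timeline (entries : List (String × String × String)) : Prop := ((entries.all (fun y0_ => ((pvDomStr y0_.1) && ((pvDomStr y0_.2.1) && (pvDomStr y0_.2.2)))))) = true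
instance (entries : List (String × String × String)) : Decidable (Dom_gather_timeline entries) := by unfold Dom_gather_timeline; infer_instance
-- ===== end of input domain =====

-- B collects each phrase's first-occurrence record per phrase and sorts by a combined
-- (entry index, phrase index) key, instead of A's single scan with a running seen-set
-- (objective: alternative decomposition, same asymptotic cost).

-- ===== PORT A =====
def pvPhrases : List String :=
  ["Spawn Update Task", "Two-pass update", "Begin hwidacq", "Queuing",
   "Entered OTA state", "tftp src", "Update", "Update completed", "Rebooting"]

def gather_timeline (entries : List (String × String × String)) : List (String × String) :=
  (entries.foldl
    (fun (st : PySem.Set String × List (String × String)) y =>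
      pvPhrases.foldl
        (fun st phrase =>
          if PySem.Str.isIn phrase (String.ofList (PySem.Chars.strip (y.2.1.toList ++ ' ' :: y.2.2.toList))) && !(PySem.Set.contains st.1 phrase) then
            (PySem.Set.add st.1 phrase,
             st.2 ++ [(if y.1 = "" then "(no-ts)" else y.1,
                       String.ofList (PySem.Chars.strip (y.2.1.toList ++ ' ' :: y.2.2.toList)))])
          else st)
        st)
    (PySem.Set.empty, [])).2

-- ===== PORT B =====
-- the (ts or "(no-ts)", f"{tag} {msg}".strip()) view of one entry
def pvCombined (y : String × String × String) : String × String :=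
  (if y.1 = "" then "(no-ts)" else y.1,
   String.ofList (PySem.Chars.strip (y.2.1.toList ++ ' ' :: y.2.2.toList)))

-- the inner 'for e, (out_ts, combined) in enumerate(combos): if phrase in combined: …; break'
def pvFindFirst (phrase : String) : List (Int × String × String) → Option (Int × String × String)
  | [] => none
  | r :: rest => if PySem.Str.isIn phrase r.2.2 then some r else pvFindFirst phrase rest

-- the record appended for one (p, phrase) pair (empty when the phrase never occurs)
def pvRecOf (combos : List (String × String)) (pp : Int × String) : List (Int × String × String) :=
  match pvFindFirst pp.2 (PySem.List.enumerate combos 0) with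
  | some r => [(r.1 * (pvPhrases.length : Int) + pp.1, r.2)]
  | none => []

def gather_timeline_alt (entries : List (String × String × String)) : List (String × String) :=
  let combos := entries.map pvCombined
  let records := (PySem.List.enumerate pvPhrases 0).foldl
    (fun acc pp => acc ++ pvRecOf combos pp) []
  (PySem.List.sorted records (fun r => r.1) false).map (fun r => r.2)

-- ===== PRECONDITION & SPEC =====
def Spec_gather_timeline (entries : List (String × String × String)) (out : List (String × String)) : Prop := out = gather_timeline_alt entries
instance (entries : List (String × String × String)) (out : List (String × String)) : Decidable (Spec_gather_timeline entries out) := by unfold Spec_gather_timeline; infer_instance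

-- ===== CLAIM (what is proved, stated in full; the proofs are below) =====
def Claim_equal_gather_timeline : Prop := ∀ (entries : List (String × String × String)), Dom_gather_timeline entries → Spec_gather_timeline entries (gather_timeline entries)

-- ===== LEMMAS AND PROOFS =====

-- the keyed per-entry "new hits" list that A's scan produces (with B's sort keys attached)
def pvKA (seen : PySem.Set String) (i : Int) : List (String × String) → List (Int × String × String)
  | [] => []
  | tc :: rest =>
      let hits := (PySem.List.enumerate pvPhrases 0).filter
        (fun pp => PySem.Str.isIn pp.2 tc.2 && !(PySem.Set.contains seen pp.2))
      hits.map (fun pp => (i * 9 + pp.1, tc.1, tc.2))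
        ++ pvKA (PySem.Set.update seen (hits.map (·.2))) (i + 1) rest

lemma pvContains_false_iff (s : PySem.Set String) (x : String) :
    PySem.Set.contains s x = false ↔ x ∉ s := by
  constructor
  · intro h hx
    have hc := (PySem.Set.contains_iff s x).mpr hx
    rw [h] at hc
    exact Bool.noConfusion hc
  · intro hx
    cases hc : PySem.Set.contains s x with
    | false => rfl
    | true => exact absurd ((PySem.Set.contains_iff s x).mp hc) hx

lemma pvContains_add_ne (s : PySem.Set String) (p q : String) (h : q ≠ p) :
    PySem.Set.contains (PySem.Set.add s p) q = PySem.Set.contains s q := by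
  cases hc : PySem.Set.contains s q with
  | true =>
      have hmem : q ∈ PySem.Set.add s p :=
        (PySem.Set.mem_add s p q).mpr (Or.inl ((PySem.Set.contains_iff s q).mp hc))
      exact (PySem.Set.contains_iff _ q).mpr hmem
  | false =>
      have hq : q ∉ s := (pvContains_false_iff s q).mp hc
      refine (pvContains_false_iff _ q).mpr ?_
      intro hmem
      rcases (PySem.Set.mem_add s p q).mp hmem with h1 | h1
      · exact hq h1
      · exact h h1

-- filter-by-snd commutes with enumerate
lemma pvEnumFilterSnd (c : String) (seen : PySem.Set String) (ps : List String) :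
    ∀ s : Int,
    (((PySem.List.enumerate ps s).filter
        (fun pp => PySem.Str.isIn pp.2 c && !(PySem.Set.contains seen pp.2))).map (·.2))
      = ps.filter (fun p => PySem.Str.isIn p c && !(PySem.Set.contains seen p)) := by
  induction ps with
  | nil => intro s; simp [PySem.List.enumerate_nil]
  | cons x xs ih =>
      intro s
      rw [PySem.List.enumerate_cons]
      by_cases hx : (PySem.Str.isIn x c && !(PySem.Set.contains seen x)) = true
      · rw [List.filter_cons, List.filter_cons, if_pos hx, if_pos hx, List.map_cons, ih (s + 1)]
      · rw [List.filter_cons, List.filter_cons, if_neg hx, if_neg hx, ih (s + 1)]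

-- A's inner loop over the phrase list, from any state
lemma pvInner (c : String) (rec : String × String) :
    ∀ (ps : List String), ps.Nodup → ∀ (seen : PySem.Set String) (out : List (String × String)),
    ps.foldl
      (fun st phrase =>
        if PySem.Str.isIn phrase c && !(PySem.Set.contains st.1 phrase) then
          (PySem.Set.add st.1 phrase, st.2 ++ [rec])
        else st)
      (seen, out)
    = (PySem.Set.update seen (ps.filter (fun p => PySem.Str.isIn p c && !(PySem.Set.contains seen p))),
       out ++ (ps.filter (fun p => PySem.Str.isIn p c && !(PySem.Set.contains seen p))).map (fun _ => rec)) := by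
  intro ps
  induction ps with
  | nil => intro _ seen out; simp [PySem.Set.update]
  | cons p ps ih =>
      intro hnd seen out
      have hpnotin : p ∉ ps := (List.nodup_cons.mp hnd).1
      have hnd' : ps.Nodup := (List.nodup_cons.mp hnd).2
      have hfeq : ps.filter (fun q => PySem.Str.isIn q c && !(PySem.Set.contains (PySem.Set.add seen p) q))
          = ps.filter (fun q => PySem.Str.isIn q c && !(PySem.Set.contains seen q)) := by
        apply List.filter_congr
        intro q hq
        rw [pvContains_add_ne seen p q (fun h => hpnotin (h ▸ hq))]
      by_cases hcond : (PySem.Str.isIn p c && !(PySem.Set.contains seen p)) = true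
      · simp only [List.foldl_cons]
        rw [if_pos hcond]
        rw [ih hnd' (PySem.Set.add seen p) (out ++ [rec]), hfeq]
        have hfc : (p :: ps).filter (fun q => PySem.Str.isIn q c && !(PySem.Set.contains seen q))
            = p :: ps.filter (fun q => PySem.Str.isIn q c && !(PySem.Set.contains seen q)) := by
          rw [List.filter_cons, if_pos hcond]
        rw [hfc, PySem.Set.update_cons, List.map_cons, List.append_assoc]
        rfl
      · simp only [List.foldl_cons]
        rw [if_neg hcond]
        rw [ih hnd' seen out]
        have hfc : (p :: ps).filter (fun q => PySem.Str.isIn q c && !(PySem.Set.contains seen q))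
            = ps.filter (fun q => PySem.Str.isIn q c && !(PySem.Set.contains seen q)) := by
          rw [List.filter_cons, if_neg hcond]
        rw [hfc]

lemma pvPhrases_nodup : pvPhrases.Nodup := by decide

-- A's outer loop produces (the projection of) pvKA
lemma pvOuter :
    ∀ (es : List (String × String × String)) (seen : PySem.Set String) (out : List (String × String)) (i : Int),
    (es.foldl
      (fun (st : PySem.Set String × List (String × String)) y =>
        pvPhrases.foldl
          (fun st phrase =>
            if PySem.Str.isIn phrase (pvCombined y).2 && !(PySem.Set.contains st.1 phrase) then
              (PySem.Set.add st.1 phrase, st.2 ++ [pvCombined y])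
            else st)
          st)
      (seen, out)).2
    = out ++ (pvKA seen i (es.map pvCombined)).map (·.2) := by
  intro es
  induction es with
  | nil => intro seen out i; simp [pvKA]
  | cons y ys ih =>
      intro seen out i
      simp only [List.foldl_cons]
      rw [pvInner (pvCombined y).2 (pvCombined y) pvPhrases pvPhrases_nodup seen out]
      rw [ih _ _ (i + 1)]
      simp only [List.map_cons, pvKA]
      have hsnd := pvEnumFilterSnd (pvCombined y).2 seen pvPhrases 0
      rw [List.map_append]
      have h1 : (List.map (fun pp : Int × String => (i * 9 + pp.1, (pvCombined y).1, (pvCombined y).2))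
            ((PySem.List.enumerate pvPhrases 0).filter
              (fun pp => PySem.Str.isIn pp.2 (pvCombined y).2 && !(PySem.Set.contains seen pp.2)))).map (fun r => r.2)
          = (pvPhrases.filter
              (fun p => PySem.Str.isIn p (pvCombined y).2 && !(PySem.Set.contains seen p))).map
              (fun _ => pvCombined y) := by
        rw [List.map_map, ← hsnd, List.map_map]
        rfl
      rw [h1, hsnd, List.append_assoc]

lemma pvA_eq (entries : List (String × String × String)) :
    gather_timeline entries = (pvKA PySem.Set.empty 0 (entries.map pvCombined)).map (·.2) := by
  have h := pvOuter entries PySem.Set.empty [] 0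
  rw [List.nil_append] at h
  exact h

-- membership characterisation of pvRecOf
lemma pvMem_recOf (combos : List (String × String)) (pp : Int × String) (x : Int × String × String) :
    x ∈ pvRecOf combos pp ↔
      ∃ r, pvFindFirst pp.2 (PySem.List.enumerate combos 0) = some r ∧ x = (r.1 * 9 + pp.1, r.2) := by
  have h9 : (pvPhrases.length : Int) = 9 := rfl
  unfold pvRecOf
  rcases h : pvFindFirst pp.2 (PySem.List.enumerate combos 0) with _ | r
  · simp [h]
  · simp [h, h9]

-- how 'contains' behaves through one pvKA step's seen-update
lemma pvSeenStep (seen : PySem.Set String) (tc : String × String) (q : String) (hq : q ∈ pvPhrases) :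
    PySem.Set.contains
        (PySem.Set.update seen
          ((((PySem.List.enumerate pvPhrases 0).filter
              (fun pp => PySem.Str.isIn pp.2 tc.2 && !(PySem.Set.contains seen pp.2))).map (·.2)))) q = false
      ↔ (PySem.Set.contains seen q = false ∧ PySem.Str.isIn q tc.2 = false) := by
  rw [pvContains_false_iff, pvEnumFilterSnd tc.2 seen pvPhrases 0]
  simp only [PySem.Set.mem_update, List.mem_filter, Bool.and_eq_true, Bool.not_eq_true', not_or]
  constructor
  · rintro ⟨hns, hnot⟩
    have hc : PySem.Set.contains seen q = false := (pvContains_false_iff _ _).mpr hns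
    refine ⟨hc, ?_⟩
    by_cases hi : PySem.Str.isIn q tc.2 = true
    · exact absurd ⟨hq, hi, hc⟩ hnot
    · exact Bool.eq_false_iff.mpr hi
  · rintro ⟨hc, hi⟩
    refine ⟨(pvContains_false_iff _ _).mp hc, ?_⟩
    rintro ⟨-, hi', -⟩
    rw [hi] at hi'
    exact Bool.noConfusion hi'

lemma pvMem_snd_phrases (pp : Int × String) (h : pp ∈ PySem.List.enumerate pvPhrases 0) :
    pp.2 ∈ pvPhrases := by
  obtain ⟨k, hk, rfl⟩ := (PySem.List.mem_enumerate_iff pvPhrases 0 pp).mp h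
  simp

-- membership characterisation of pvKA
lemma pvMem_KA :
    ∀ (combos : List (String × String)) (seen : PySem.Set String) (i : Int) (x : Int × String × String),
    x ∈ pvKA seen i combos ↔
      ∃ pp ∈ PySem.List.enumerate pvPhrases 0, PySem.Set.contains seen pp.2 = false ∧
        ∃ r, pvFindFirst pp.2 (PySem.List.enumerate combos i) = some r ∧ x = (r.1 * 9 + pp.1, r.2) := by
  intro combos
  induction combos with
  | nil =>
      intro seen i x
      simp [pvKA, PySem.List.enumerate_nil, pvFindFirst]
  | cons tc rest ih =>
      intro seen i x
      simp only [pvKA, List.mem_append]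
      constructor
      · rintro (hx | hx)
        · obtain ⟨pp, hpp, rfl⟩ := List.mem_map.mp hx
          obtain ⟨hppE, hcond⟩ := List.mem_filter.mp hpp
          obtain ⟨hin, hns⟩ := (Bool.and_eq_true _ _).mp hcond
          refine ⟨pp, hppE, by simpa using hns, ⟨(i, tc.1, tc.2), ?_, rfl⟩⟩
          rw [PySem.List.enumerate_cons]
          simp only [pvFindFirst]
          rw [if_pos hin]
        · obtain ⟨pp, hppE, hseen', r, hfind, rfl⟩ := (ih _ _ x).mp hx
          have hq := pvMem_snd_phrases pp hppE
          obtain ⟨hs, hi⟩ := (pvSeenStep seen tc pp.2 hq).mp hseen'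
          have hni : ¬ (PySem.Str.isIn pp.2 tc.2 = true) := by rw [hi]; decide
          refine ⟨pp, hppE, hs, r, ?_, rfl⟩
          rw [PySem.List.enumerate_cons]
          simp only [pvFindFirst]
          rw [if_neg hni]
          exact hfind
      · rintro ⟨pp, hppE, hseen, r, hfind, rfl⟩
        rw [PySem.List.enumerate_cons] at hfind
        simp only [pvFindFirst] at hfind
        have hq := pvMem_snd_phrases pp hppE
        by_cases hin : PySem.Str.isIn pp.2 tc.2 = true
        · left
          rw [if_pos hin] at hfind
          have hr : (i, tc.1, tc.2) = r := by
            have h' := Option.some.inj hfind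
            rw [← h']
          refine List.mem_map.mpr ⟨pp, List.mem_filter.mpr ⟨hppE, ?_⟩, ?_⟩
          · exact (Bool.and_eq_true _ _).mpr ⟨hin, by rw [hseen]; rfl⟩
          · rw [← hr]
        · right
          rw [if_neg hin] at hfind
          have hif : PySem.Str.isIn pp.2 tc.2 = false := Bool.eq_false_iff.mpr hin
          exact (ih _ _ _).mpr
            ⟨pp, hppE, (pvSeenStep seen tc pp.2 hq).mpr ⟨hseen, hif⟩, r, hfind, rfl⟩

lemma pvPhrases_len : pvPhrases.length = 9 := rfl

-- lower bound on the keys of pvKA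
lemma pvKA_key_lb :
    ∀ (combos : List (String × String)) (seen : PySem.Set String) (i : Int) (x : Int × String × String),
    x ∈ pvKA seen i combos → i * 9 ≤ x.1 := by
  intro combos
  induction combos with
  | nil => intro seen i x h; simp [pvKA] at h
  | cons tc rest ih =>
      intro seen i x h
      simp only [pvKA, List.mem_append] at h
      rcases h with h | h
      · obtain ⟨pp, hpp, rfl⟩ := List.mem_map.mp h
        obtain ⟨k, hk, rfl⟩ := (PySem.List.mem_enumerate_iff pvPhrases 0 pp).mp (List.mem_filter.mp hpp).1
        simp only
        omega
      · have := ih _ (i + 1) x h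
        omega

-- keys of pvKA are strictly increasing
lemma pvKA_pairwise :
    ∀ (combos : List (String × String)) (seen : PySem.Set String) (i : Int),
    (pvKA seen i combos).Pairwise (fun a b => a.1 < b.1) := by
  intro combos
  induction combos with
  | nil => intro seen i; simp [pvKA]
  | cons tc rest ih =>
      intro seen i
      simp only [pvKA]
      rw [List.pairwise_append]
      refine ⟨?_, ih _ (i + 1), ?_⟩
      · rw [List.pairwise_map]
        refine List.Pairwise.imp ?_ (((PySem.List.pairwise_lt_enumerate pvPhrases 0)).filter _)
        intro a b hab
        simpa using by omega
      · intro a ha b hb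
        obtain ⟨pp, hpp, rfl⟩ := List.mem_map.mp ha
        obtain ⟨k, hk, rfl⟩ := (PySem.List.mem_enumerate_iff pvPhrases 0 pp).mp (List.mem_filter.mp hpp).1
        have hb9 := pvKA_key_lb rest _ (i + 1) b hb
        rw [pvPhrases_len] at hk
        simp only
        omega

-- every key produced from a (p, phrase) pair is ≡ p modulo the block of 9
lemma pvKeyOf (combos : List (String × String)) (l : List (Int × String)) (b : Int × String × String)
    (hb : b ∈ l.flatMap (pvRecOf combos)) : ∃ qq ∈ l, ∃ e : Int, b.1 = e * 9 + qq.1 := by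
  obtain ⟨qq, hqq, hbm⟩ := List.mem_flatMap.mp hb
  obtain ⟨r, _, rfl⟩ := (pvMem_recOf combos qq b).mp hbm
  exact ⟨qq, hqq, r.1, rfl⟩

-- the records list has pairwise distinct keys
lemma pvRecords_pairwise (combos : List (String × String)) :
    ∀ (l : List (Int × String)), l.Pairwise (fun a b => a.1 < b.1) →
      (∀ pp ∈ l, 0 ≤ pp.1 ∧ pp.1 < 9) →
      (l.flatMap (pvRecOf combos)).Pairwise (fun a b => a.1 ≠ b.1) := by
  intro l
  induction l with
  | nil => intro _ _; simp
  | cons pp rest ih =>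
      intro hpw hbnd
      rw [List.flatMap_cons, List.pairwise_append]
      refine ⟨?_, ih (List.pairwise_cons.mp hpw).2
          (fun qq h => hbnd qq (List.mem_cons_of_mem _ h)), ?_⟩
      · unfold pvRecOf
        rcases h : pvFindFirst pp.2 (PySem.List.enumerate combos 0) with _ | r <;> simp
      · intro a ha b hb
        obtain ⟨r, _, rfl⟩ := (pvMem_recOf combos pp a).mp ha
        obtain ⟨qq, hqq, e, hbkey⟩ := pvKeyOf combos rest b hb
        have h1 := hbnd pp (List.mem_cons_self)
        have h2 := hbnd qq (List.mem_cons_of_mem _ hqq)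
        have hlt : pp.1 < qq.1 := (List.pairwise_cons.mp hpw).1 qq hqq
        simp only
        omega

lemma pvEnum_bounds (pp : Int × String) (h : pp ∈ PySem.List.enumerate pvPhrases 0) :
    0 ≤ pp.1 ∧ pp.1 < 9 := by
  obtain ⟨k, hk, rfl⟩ := (PySem.List.mem_enumerate_iff pvPhrases 0 pp).mp h
  rw [pvPhrases_len] at hk
  simp only
  omega

lemma pvB_eq (entries : List (String × String × String)) :
    gather_timeline_alt entries = (pvKA PySem.Set.empty 0 (entries.map pvCombined)).map (·.2) := by
  simp only [gather_timeline_alt]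
  rw [PySem.List.foldl_append_eq_flatMap, List.nil_append]
  have hnodKA : (pvKA PySem.Set.empty 0 (entries.map pvCombined)).Nodup :=
    List.Pairwise.imp (fun hab heq => absurd (heq ▸ hab) (lt_irrefl _))
      (pvKA_pairwise (entries.map pvCombined) PySem.Set.empty 0)
  have hnodRec : ((PySem.List.enumerate pvPhrases 0).flatMap (pvRecOf (entries.map pvCombined))).Nodup :=
    List.Pairwise.imp (fun hab heq => absurd (heq ▸ hab) (fun h => h rfl))
      (pvRecords_pairwise (entries.map pvCombined) (PySem.List.enumerate pvPhrases 0)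
        (PySem.List.pairwise_lt_enumerate pvPhrases 0) pvEnum_bounds)
  have hmem : ∀ x, x ∈ pvKA PySem.Set.empty 0 (entries.map pvCombined) ↔
      x ∈ (PySem.List.enumerate pvPhrases 0).flatMap (pvRecOf (entries.map pvCombined)) := by
    intro x
    rw [pvMem_KA, List.mem_flatMap]
    constructor
    · rintro ⟨pp, hpp, _, r, hfind, rfl⟩
      exact ⟨pp, hpp, (pvMem_recOf _ pp _).mpr ⟨r, hfind, rfl⟩⟩
    · rintro ⟨pp, hpp, hx⟩
      obtain ⟨r, hfind, rfl⟩ := (pvMem_recOf _ pp _).mp hx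
      exact ⟨pp, hpp, rfl, r, hfind, rfl⟩
  have hperm : (pvKA PySem.Set.empty 0 (entries.map pvCombined)).Perm
      ((PySem.List.enumerate pvPhrases 0).flatMap (pvRecOf (entries.map pvCombined))) :=
    (List.perm_ext_iff_of_nodup hnodKA hnodRec).mpr hmem
  rw [PySem.List.sorted_eq_of_perm_of_pairwise_lt _ _ (fun r => r.1) hperm
      (pvKA_pairwise (entries.map pvCombined) PySem.Set.empty 0)]

-- ===== VERDICT (by name: the statement is the Claim_ definition above) =====
theorem gather_timeline_spec : Claim_equal_gather_timeline := by
  intro entries _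
  show gather_timeline entries = gather_timeline_alt entries
  rw [pvA_eq, pvB_eq]
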